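-- pv_equiv track=rewrite | github.com/gandolfreddy/oajudge | p135.py | weight_sum
-- ===== SOURCE A (Python) =====
-- dt = {chr(ord('a')+i): i+1 for i in range(26)}
--
-- def weight_sum(s):
--     w_sum = 0
--     s = s.lower()
--     for ch in s:
--         if ch >= 'a' and ch <= 'z':
--             w_sum += dt[ch]
--         else:
--             return 0
--     return w_sum
-- ===== SOURCE B (Python) =====
-- def weight_sum(s):
--     s = s.lower()
--     counts = {}
--     for ch in s:
--         counts[ch] = counts.get(ch, 0) + 1
--     total = 0
--     seen = 0
--     for i in range(26):
--         c = counts.get(chr(97 + i), 0)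
--         total += (i + 1) * c
--         seen += c
--     return total if seen == len(s) else 0
-- ===== Notes on version B (the rewrite author's own statement) =====
-- stated objective: alternative
-- what changed: Replaces A's single early-exiting scan with dict lookups per character by a histogram approach: build a character-frequency dictionary in one pass, then iterate over the 26 letters only, summing weight*count and accumulating the number of letter occurrences; the string is valid iff the letter occurrences account for the whole length.
import Mathlib
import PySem

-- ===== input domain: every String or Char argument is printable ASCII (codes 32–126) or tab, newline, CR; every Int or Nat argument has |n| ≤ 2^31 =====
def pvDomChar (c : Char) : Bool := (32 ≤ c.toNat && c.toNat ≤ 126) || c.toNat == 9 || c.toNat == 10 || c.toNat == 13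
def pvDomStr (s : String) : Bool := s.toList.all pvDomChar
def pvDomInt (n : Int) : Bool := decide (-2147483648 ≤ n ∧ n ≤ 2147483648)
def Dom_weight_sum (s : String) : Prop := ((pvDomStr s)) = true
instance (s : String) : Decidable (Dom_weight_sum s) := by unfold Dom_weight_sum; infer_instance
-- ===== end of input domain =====

-- B replaces A's single early-exiting per-character scan by a histogram: one counting
-- pass builds a char-frequency dict, then a loop over the 26 letters sums weight*count
-- and checks that the letter counts account for the whole string length.

-- ===== PORT A =====
-- module constant: dt = {chr(ord('a')+i): i+1 for i in range(26)}
def dtA : PySem.Dict Char Int :=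
  (PySem.List.pyRange 0 26 1).foldl
    (fun d i => d.insert (Char.ofNat (97 + i.toNat)) (i + 1)) PySem.Dict.empty

-- the for-loop with its early 'return 0'; dt[ch] is guarded by the letter test, so the
-- key is always present and getD 0 is exact on the reachable path
def weightLoopA (acc : Int) : List Char → Int
  | [] => acc
  | ch :: rest =>
      if 'a' ≤ ch ∧ ch ≤ 'z' then weightLoopA (acc + dtA.getD ch 0) rest
      else 0

def weight_sum (s : String) : Int :=
  weightLoopA 0 (PySem.Str.lower s).toList

-- ===== PORT B =====
def weight_sum_alt (s : String) : Int :=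
  let cs := (PySem.Str.lower s).toList
  let counts := cs.foldl (fun d ch => d.insert ch (d.getD ch 0 + 1)) PySem.Dict.empty
  let p := (PySem.List.pyRange 0 26 1).foldl
    (fun (p : Int × Int) i =>
      (p.1 + (i + 1) * counts.getD (Char.ofNat (97 + i.toNat)) 0,
       p.2 + counts.getD (Char.ofNat (97 + i.toNat)) 0)) (0, 0)
  if p.2 = (cs.length : Int) then p.1 else 0

-- ===== PRECONDITION & SPEC =====
def Spec_weight_sum (s : String) (out : Int) : Prop := out = weight_sum_alt s
instance (s : String) (out : Int) : Decidable (Spec_weight_sum s out) := by unfold Spec_weight_sum; infer_instance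

-- ===== CLAIM (what is proved, stated in full; the proofs are below) =====
def Claim_equal_weight_sum : Prop := ∀ (s : String), Dom_weight_sum s → Spec_weight_sum s (weight_sum s)

-- ===== LEMMAS AND PROOFS =====

theorem dtA_getD (ch : Char) (h1 : 'a' ≤ ch) (h2 : ch ≤ 'z') :
    dtA.getD ch 0 = (ch.toNat : Int) - 96 := by
  have h1' : 97 ≤ ch.toNat := h1
  have h2' : ch.toNat ≤ 122 := h2
  have he : ch = Char.ofNat ch.toNat := (Char.ofNat_toNat ch).symm
  rw [he]
  set n := ch.toNat with hn
  clear_value n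
  interval_cases n <;> decide

theorem weightLoopA_eq (cs : List Char) (acc : Int) :
    weightLoopA acc cs =
      if cs.all (fun ch => decide ('a' ≤ ch ∧ ch ≤ 'z')) then
        acc + (cs.map (fun ch => (ch.toNat : Int) - 96)).sum
      else 0 := by
  induction cs generalizing acc with
  | nil => simp [weightLoopA]
  | cons ch rest ih =>
      by_cases h : 'a' ≤ ch ∧ ch ≤ 'z'
      · rw [show weightLoopA acc (ch :: rest) = weightLoopA (acc + dtA.getD ch 0) rest from
            by simp [weightLoopA, h]]
        rw [ih, dtA_getD ch h.1 h.2]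
        simp only [List.all_cons, List.map_cons, List.sum_cons]
        have hd : (decide ('a' ≤ ch ∧ ch ≤ 'z')) = true := by simp [h]
        rw [hd, Bool.true_and]
        split_ifs
        · ring
        · rfl
      · simp [weightLoopA, h]

-- Σ_{i=0}^{25} [chr(97+i) = ch] = 1 for a lowercase letter ch
theorem ind_sum_letter (ch : Char) (h1 : 'a' ≤ ch) (h2 : ch ≤ 'z') :
    ((PySem.List.pyRange 0 26 1).map
      (fun i => if ch == Char.ofNat (97 + i.toNat) then (1 : Int) else 0)).sum = 1 := by
  have h1' : 97 ≤ ch.toNat := h1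
  have h2' : ch.toNat ≤ 122 := h2
  have he : ch = Char.ofNat ch.toNat := (Char.ofNat_toNat ch).symm
  rw [he]
  set n := ch.toNat with hn
  clear_value n
  interval_cases n <;> decide

-- … and = 0 for any non-letter ch
theorem ind_sum_nonletter (ch : Char) (h : ¬('a' ≤ ch ∧ ch ≤ 'z')) :
    ((PySem.List.pyRange 0 26 1).map
      (fun i => if ch == Char.ofNat (97 + i.toNat) then (1 : Int) else 0)).sum = 0 := by
  apply List.sum_eq_zero
  intro x hx
  obtain ⟨i, hi, rfl⟩ := List.mem_map.mp hx
  have hr : PySem.List.pyRange 0 26 1 =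
      [0,1,2,3,4,5,6,7,8,9,10,11,12,13,14,15,16,17,18,19,20,21,22,23,24,25] := by decide
  rw [hr] at hi
  fin_cases hi <;>
    · refine if_neg ?_
      intro hb
      rw [eq_of_beq hb] at h
      exact h (by decide)

-- Σ_{i=0}^{25} (i+1)·[chr(97+i) = ch] = ch - 96 for a lowercase letter ch
theorem wind_sum_letter (ch : Char) (h1 : 'a' ≤ ch) (h2 : ch ≤ 'z') :
    ((PySem.List.pyRange 0 26 1).map
      (fun i => (i + 1) * if ch == Char.ofNat (97 + i.toNat) then (1 : Int) else 0)).sum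
      = (ch.toNat : Int) - 96 := by
  have h1' : 97 ≤ ch.toNat := h1
  have h2' : ch.toNat ≤ 122 := h2
  have he : ch = Char.ofNat ch.toNat := (Char.ofNat_toNat ch).symm
  rw [he]
  set n := ch.toNat with hn
  clear_value n
  interval_cases n <;> decide

-- the 'seen' accumulator counts exactly the letter occurrences of cs
theorem N_eq (cs : List Char) :
    ((PySem.List.pyRange 0 26 1).map
      (fun i => ((cs.count (Char.ofNat (97 + i.toNat)) : Nat) : Int))).sum
      = (cs.countP (fun ch => decide ('a' ≤ ch ∧ ch ≤ 'z')) : Int) := by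
  induction cs with
  | nil => decide
  | cons ch rest ih =>
      simp only [List.count_cons, List.countP_cons]
      push_cast [apply_ite (fun n : Nat => (n : Int))]
      rw [PySem.List.sum_map_add_int
        (f := fun i : Int => ((rest.count (Char.ofNat (97 + i.toNat)) : Nat) : Int))
        (g := fun i : Int => if ch == Char.ofNat (97 + i.toNat) then (1 : Int) else 0)]
      rw [ih]
      by_cases h : 'a' ≤ ch ∧ ch ≤ 'z'
      · rw [ind_sum_letter ch h.1 h.2]
        simp [h]
      · rw [ind_sum_nonletter ch h]
        simp [h]

-- on an all-letter string the 'total' accumulator is the weight sum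
theorem T_eq (cs : List Char) (hall : ∀ ch ∈ cs, 'a' ≤ ch ∧ ch ≤ 'z') :
    ((PySem.List.pyRange 0 26 1).map
      (fun i => (i + 1) * ((cs.count (Char.ofNat (97 + i.toNat)) : Nat) : Int))).sum
      = (cs.map (fun ch => (ch.toNat : Int) - 96)).sum := by
  induction cs with
  | nil => decide
  | cons ch rest ih =>
      have hch := hall ch (by simp)
      simp only [List.count_cons, List.map_cons, List.sum_cons]
      push_cast [apply_ite (fun n : Nat => (n : Int))]
      simp only [mul_add]
      rw [PySem.List.sum_map_add_int
        (f := fun i : Int => (i + 1) * ((rest.count (Char.ofNat (97 + i.toNat)) : Nat) : Int))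
        (g := fun i : Int => (i + 1) * if ch == Char.ofNat (97 + i.toNat) then (1 : Int) else 0)]
      rw [ih (fun c hc => hall c (by simp [hc])), wind_sum_letter ch hch.1 hch.2]
      ring

-- B's value in closed form
theorem alt_eq (s : String) :
    weight_sum_alt s =
      if ((PySem.Str.lower s).toList).all (fun ch => decide ('a' ≤ ch ∧ ch ≤ 'z')) then
        (((PySem.Str.lower s).toList).map (fun ch => (ch.toNat : Int) - 96)).sum
      else 0 := by
  unfold weight_sum_alt
  dsimp only
  generalize (PySem.Str.lower s).toList = cs
  simp only [PySem.Dict.getD_foldl_insert_add_one, PySem.Dict.getD_empty, zero_add]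
  rw [PySem.List.foldl_prod_mk
    (f := fun acc (i : Int) => acc + (i + 1) * ((cs.count (Char.ofNat (97 + i.toNat)) : Nat) : Int))
    (g := fun acc (i : Int) => acc + ((cs.count (Char.ofNat (97 + i.toNat)) : Nat) : Int))]
  rw [PySem.List.foldl_add, PySem.List.foldl_add]
  by_cases hall : cs.all (fun ch => decide ('a' ≤ ch ∧ ch ≤ 'z'))
  · have hforall : ∀ ch ∈ cs, 'a' ≤ ch ∧ ch ≤ 'z' := by
      intro c hc
      have := List.all_eq_true.mp hall c hc
      exact of_decide_eq_true this
    have hcount : cs.countP (fun ch => decide ('a' ≤ ch ∧ ch ≤ 'z')) = cs.length := by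
      rw [List.countP_eq_length]
      intro c hc; exact decide_eq_true (hforall c hc)
    rw [if_pos]
    · rw [if_pos hall]
      dsimp only
      rw [zero_add, T_eq cs hforall]
    · dsimp only
      rw [zero_add, N_eq, hcount]
  · rw [if_neg hall]
    split_ifs with hc
    · exfalso
      dsimp only at hc
      rw [zero_add, N_eq] at hc
      have hl : cs.countP (fun ch => decide ('a' ≤ ch ∧ ch ≤ 'z')) = cs.length := by
        exact_mod_cast hc
      exact hall (List.all_eq_true.mpr (List.countP_eq_length.mp hl))
    · rfl

-- ===== VERDICT (by name: the statement is the Claim_ definition above) =====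
theorem weight_sum_spec : Claim_equal_weight_sum := by
  intro s _
  unfold Spec_weight_sum weight_sum
  rw [weightLoopA_eq, alt_eq]
  split_ifs <;> simp
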